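-- pv_equiv track=rewrite | github.com/autowiki4/LeetCode | stack/maximum-nesting-depth-of-two-valid-parentheses-strings.py | maxDepthAfterSplit
-- ===== SOURCE A (Python) =====
-- from typing import List
--
-- def maxDepthAfterSplit(seq: str) -> List[int]:
--     answer = []
--     curr = 0
--     for c in seq:
--         if c == '(':
--             curr += 1
--             answer.append(curr % 2)
--         elif c == ')':
--             answer.append(curr%2)
--             curr -= 1
--     return answer
-- ===== SOURCE B (Python) =====
-- def maxDepthAfterSplit(seq: str):
--     parens = [c for c in seq if c in '()']
--     return [(i + (c == '(')) % 2 for i, c in enumerate(parens)]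
-- ===== Notes on version B (the rewrite author's own statement) =====
-- stated objective: simpler
-- what changed: Replaces the running depth counter with a stateless read-off: filter out the paren characters once, then each paren's group is the parity of its index among the parens (plus one for an opener), since every paren flips the balance parity.
import Mathlib
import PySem

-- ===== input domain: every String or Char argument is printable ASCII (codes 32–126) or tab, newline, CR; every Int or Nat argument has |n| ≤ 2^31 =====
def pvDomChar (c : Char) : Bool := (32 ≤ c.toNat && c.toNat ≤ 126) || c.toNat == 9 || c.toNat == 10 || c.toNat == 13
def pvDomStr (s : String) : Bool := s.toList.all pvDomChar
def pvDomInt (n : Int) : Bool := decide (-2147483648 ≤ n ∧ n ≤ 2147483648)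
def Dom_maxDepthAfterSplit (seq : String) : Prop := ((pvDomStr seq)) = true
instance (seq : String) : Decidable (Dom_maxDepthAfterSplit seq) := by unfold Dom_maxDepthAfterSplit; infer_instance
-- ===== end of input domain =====

-- B replaces A's running depth counter with a stateless read-off of the parity of each
-- parenthesis's index among the paren characters (simpler: no loop state).

-- ===== PORT A =====
-- one loop step of A: '(' bumps the counter then emits its parity, ')' emits then drops it
def pvStepA (st : List Int × Int) (c : Char) : List Int × Int :=
  if c = '(' then (st.1 ++ [PySem.Int.mod (st.2 + 1) 2], st.2 + 1)
  else if c = ')' then (st.1 ++ [PySem.Int.mod st.2 2], st.2 - 1)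
  else st

def maxDepthAfterSplit (seq : String) : List Int :=
  (seq.toList.foldl pvStepA (([] : List Int), (0 : Int))).1

-- ===== PORT B =====
def maxDepthAfterSplit_alt (seq : String) : List Int :=
  let parens := seq.toList.filter (fun c => c = '(' || c = ')')
  (PySem.List.enumerate parens).map
    (fun ic => PySem.Int.mod (ic.1 + (if ic.2 = '(' then 1 else 0)) 2)

-- ===== PRECONDITION & SPEC =====
def Spec_maxDepthAfterSplit (seq : String) (out : List Int) : Prop := out = maxDepthAfterSplit_alt seq
instance (seq : String) (out : List Int) : Decidable (Spec_maxDepthAfterSplit seq out) := by unfold Spec_maxDepthAfterSplit; infer_instance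

-- ===== CLAIM (what is proved, stated in full; the proofs are below) =====
def Claim_equal_maxDepthAfterSplit : Prop := ∀ (seq : String), Dom_maxDepthAfterSplit seq → Spec_maxDepthAfterSplit seq (maxDepthAfterSplit seq)

-- ===== LEMMAS AND PROOFS =====

-- invariant: the counter and the enumerate start index have equal parity
theorem pv_loop_eq (l : List Char) : ∀ (acc : List Int) (curr s : Int), curr % 2 = s % 2 →
    (l.foldl pvStepA (acc, curr)).1
      = acc ++ (PySem.List.enumerate (l.filter (fun c => c = '(' || c = ')')) s).map
          (fun ic => PySem.Int.mod (ic.1 + (if ic.2 = '(' then 1 else 0)) 2) := by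
  induction l with
  | nil => intro acc curr s _; simp [PySem.List.enumerate_nil]
  | cons c l ih =>
    intro acc curr s hpar
    by_cases h1 : c = '('
    · subst h1
      have hp1 : (curr + 1) % 2 = (s + 1) % 2 := by omega
      rw [List.foldl_cons,
          show pvStepA (acc, curr) '(' = (acc ++ [PySem.Int.mod (curr + 1) 2], curr + 1) from by
            simp [pvStepA],
          ih _ (curr + 1) (s + 1) hp1]
      rw [show PySem.Int.mod (curr + 1) 2 = PySem.Int.mod (s + 1) 2 from by
            rw [PySem.Int.mod_eq_emod_of_pos (by norm_num),
                PySem.Int.mod_eq_emod_of_pos (by norm_num)]; omega]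
      simp [PySem.List.enumerate_cons]
    · by_cases h2 : c = ')'
      · subst h2
        have hp1 : (curr - 1) % 2 = (s + 1) % 2 := by omega
        rw [List.foldl_cons,
            show pvStepA (acc, curr) ')' = (acc ++ [PySem.Int.mod curr 2], curr - 1) from by
              simp [pvStepA],
            ih _ (curr - 1) (s + 1) hp1]
        rw [show PySem.Int.mod curr 2 = PySem.Int.mod s 2 from by
              rw [PySem.Int.mod_eq_emod_of_pos (by norm_num),
                  PySem.Int.mod_eq_emod_of_pos (by norm_num)]; omega]
        simp [PySem.List.enumerate_cons]
      · rw [List.foldl_cons, show pvStepA (acc, curr) c = (acc, curr) from by simp [pvStepA, h1, h2],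
            show List.filter (fun c => decide (c = '(') || decide (c = ')')) (c :: l)
               = List.filter (fun c => decide (c = '(') || decide (c = ')')) l from by
              simp [h1, h2]]
        exact ih _ curr s hpar

-- ===== VERDICT (by name: the statement is the Claim_ definition above) =====
theorem maxDepthAfterSplit_spec : Claim_equal_maxDepthAfterSplit := by
  intro seq _
  show maxDepthAfterSplit seq = maxDepthAfterSplit_alt seq
  unfold maxDepthAfterSplit maxDepthAfterSplit_alt
  rw [pv_loop_eq _ [] 0 0 rfl]
  simp
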